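-- pv_equiv track=rewrite | github.com/CybercentreCanada/assemblyline-service-characterize | parse_lnk.py | parse_bitmask
-- ===== SOURCE A (Python) =====
-- def parse_bitmask(mask_def, mask):
--     i = 0
--     out = []
--     while mask != 0:
--         if mask & 1:
--             try:
--                 out.append(mask_def[i])
--             except IndexError:
--                 pass
--         mask >>= 1
--         i += 1
--     return out
-- ===== SOURCE B (Python) =====
-- def parse_bitmask(mask_def, mask):
--     return [d for i, d in enumerate(mask_def) if (mask >> i) & 1]
-- ===== Notes on version B (the rewrite author's own statement) =====
-- stated objective: idiomatic
-- what changed: B iterates over the definition list with enumerate and tests bit i of the mask, instead of A's while-loop that consumes the mask bit by bit and indexes the list under try/except; Pre_ excludes negative masks, on which A loops forever.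
import Mathlib
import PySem

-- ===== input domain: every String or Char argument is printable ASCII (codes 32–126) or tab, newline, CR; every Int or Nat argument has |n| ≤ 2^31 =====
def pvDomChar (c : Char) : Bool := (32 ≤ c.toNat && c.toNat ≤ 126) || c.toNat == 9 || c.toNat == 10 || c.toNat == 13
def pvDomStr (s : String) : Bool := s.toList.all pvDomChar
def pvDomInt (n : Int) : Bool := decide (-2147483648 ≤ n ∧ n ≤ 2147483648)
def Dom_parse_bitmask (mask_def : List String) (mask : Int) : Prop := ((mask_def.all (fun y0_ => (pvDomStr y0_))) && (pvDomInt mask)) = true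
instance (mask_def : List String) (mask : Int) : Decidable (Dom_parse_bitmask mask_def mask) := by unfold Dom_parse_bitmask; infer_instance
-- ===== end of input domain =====

-- B iterates over the definition list testing bit i of the mask, instead of A's
-- while-loop over the mask's bits indexing the list under try/except (idiomatic).

-- ===== PORT A =====
-- A's while loop. For mask < 0 the Python loop never terminates (mask >>= 1 stays
-- negative); the 'mask < 0 → out' branch only makes the port total, Pre_ excludes it.
def pbLoop (mask_def : List String) (mask i : Int) (out : List String) : List String :=
  if mask = 0 then out
  else if mask < 0 then out
  else
    pbLoop mask_def (mask >>> (1:ℕ)) (i + 1)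
      (if PySem.Int.band mask 1 ≠ 0 then
        -- try: out.append(mask_def[i]) except IndexError: pass
        match PySem.List.pyGet? mask_def i with
        | some v => out ++ [v]
        | none => out
      else out)
termination_by mask.toNat
decreasing_by
  have h1 : mask >>> (1:ℕ) = ((mask.toNat >>> 1 : ℕ) : Int) := by
    conv_lhs => rw [← Int.toNat_of_nonneg (by omega : (0:Int) ≤ mask)]
    rw [← Int.shiftRight_natCast_right, Int.shiftRight_natCast]
  rw [h1, Int.toNat_natCast, Nat.shiftRight_eq_div_pow]
  omega

def parse_bitmask (mask_def : List String) (mask : Int) : List String :=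
  pbLoop mask_def mask 0 []

-- ===== PORT B =====
def parse_bitmask_alt (mask_def : List String) (mask : Int) : List String :=
  (PySem.List.enumerate mask_def 0).filterMap
    (fun p => if PySem.Int.band (mask >>> p.1.toNat) 1 ≠ 0 then some p.2 else none)

-- ===== PRECONDITION & SPEC =====
-- Pre_ excludes negative masks: there A's while loop never terminates (no value is returned).
def Pre_parse_bitmask (mask_def : List String) (mask : Int) : Prop := 0 ≤ mask
instance (mask_def : List String) (mask : Int) : Decidable (Pre_parse_bitmask mask_def mask) := by unfold Pre_parse_bitmask; infer_instance

def pvWitness_parse_bitmask : List String × Int := (["a", "b", "c"], 5)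

def Spec_parse_bitmask (mask_def : List String) (mask : Int) (out : List String) : Prop := out = parse_bitmask_alt mask_def mask
instance (mask_def : List String) (mask : Int) (out : List String) : Decidable (Spec_parse_bitmask mask_def mask out) := by unfold Spec_parse_bitmask; infer_instance

-- ===== CLAIM (what is proved, stated in full; the proofs are below) =====
def Claim_equal_parse_bitmask : Prop := ∀ (mask_def : List String) (mask : Int), Dom_parse_bitmask mask_def mask → Pre_parse_bitmask mask_def mask → Spec_parse_bitmask mask_def mask (parse_bitmask mask_def mask)

-- ===== LEMMAS AND PROOFS =====
-- Common reference: consume the list front to back, halving the mask at each element.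
def bitsFilter : List String → Int → List String
  | [], _ => []
  | d :: rest, m => (if PySem.Int.band m 1 ≠ 0 then [d] else []) ++ bitsFilter rest (m >>> (1:ℕ))

theorem shift_toNat_eq (m : Int) (h : 0 ≤ m) (k : ℕ) :
    m >>> k = ((m.toNat >>> k : ℕ) : Int) := by
  conv_lhs => rw [← Int.toNat_of_nonneg h]
  rw [← Int.shiftRight_natCast_right, Int.shiftRight_natCast]

theorem shift_nonneg (m : Int) (h : 0 ≤ m) (k : ℕ) : 0 ≤ m >>> k := by
  rw [shift_toNat_eq m h k]; positivity

theorem bitsFilter_zero (L : List String) : bitsFilter L 0 = [] := by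
  induction L with
  | nil => rfl
  | cons d rest ih =>
    have hb : PySem.Int.band 0 1 = 0 := by decide
    have hs : (0:Int) >>> (1:ℕ) = 0 := by decide
    simp [bitsFilter, hb, hs, ih]

theorem pbLoop_eq : ∀ (n : ℕ) (mask : Int), mask.toNat = n → 0 ≤ mask →
    ∀ (L : List String) (i : Int), 0 ≤ i → ∀ (out : List String),
    pbLoop L mask i out = out ++ bitsFilter (L.drop i.toNat) mask := by
  intro n
  induction n using Nat.strong_induction_on with
  | _ n ih =>
    intro mask hn hm L i hi out
    rw [pbLoop]
    by_cases h0 : mask = 0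
    · subst h0; simp [bitsFilter_zero]
    · have hpos : 0 < mask := lt_of_le_of_ne hm (Ne.symm h0)
      rw [if_neg h0, if_neg (by omega)]
      have hsh := shift_toNat_eq mask hm 1
      have hlt : (mask >>> (1:ℕ)).toNat < n := by
        rw [hsh, Int.toNat_natCast, Nat.shiftRight_eq_div_pow]; omega
      have hm' : 0 ≤ mask >>> (1:ℕ) := shift_nonneg mask hm 1
      rw [ih _ hlt _ rfl hm' L (i+1) (by omega)]
      have hdrop : (i+1).toNat = i.toNat + 1 := by omega
      cases hD : L.drop i.toNat with
      | nil =>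
        have hlen : L.length ≤ i.toNat := by
          by_contra hc; exact absurd hD (by simp [List.drop_eq_nil_iff]; omega)
        have hget : PySem.List.pyGet? L i = none := by
          rw [← Int.toNat_of_nonneg hi, PySem.List.pyGet?_natCast]
          exact List.getElem?_eq_none hlen
        have hD' : L.drop (i+1).toNat = [] := by
          rw [hdrop, List.drop_eq_nil_iff]; omega
        by_cases hb : PySem.Int.band mask 1 ≠ 0 <;>
          simp [hget, hD', hb, bitsFilter]
      | cons d rest =>
        have hget : PySem.List.pyGet? L i = some d := by
          rw [← Int.toNat_of_nonneg hi, PySem.List.pyGet?_natCast, ← List.head?_drop, hD]; rfl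
        have hrest : L.drop (i+1).toNat = rest := by
          rw [hdrop, ← List.tail_drop, hD]; rfl
        by_cases hb : PySem.Int.band mask 1 ≠ 0 <;>
          simp [hget, hrest, hb, bitsFilter]

theorem alt_aux (mask : Int) (L : List String) : ∀ (s : ℕ),
    (PySem.List.enumerate L (s : Int)).filterMap
      (fun p => if PySem.Int.band (mask >>> p.1.toNat) 1 ≠ 0 then some p.2 else none)
    = bitsFilter L (mask >>> s) := by
  induction L with
  | nil => intro s; simp [PySem.List.enumerate_nil, bitsFilter]
  | cons d rest ih =>
    intro s
    have h1 : ((s : Int) + 1) = ((s + 1 : ℕ) : Int) := by push_cast; ring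
    rw [PySem.List.enumerate_cons, List.filterMap_cons, h1, ih (s+1)]
    by_cases hb : PySem.Int.band (mask >>> s) 1 ≠ 0 <;>
      simp [bitsFilter, hb, Int.toNat_natCast, Int.shiftRight_add,
        Int.shiftRight_natCast_right]

-- ===== VERDICT (by name: the statement is the Claim_ definition above) =====
theorem parse_bitmask_spec : Claim_equal_parse_bitmask := by
  intro mask_def mask _ hpre
  unfold Spec_parse_bitmask parse_bitmask parse_bitmask_alt
  rw [pbLoop_eq mask.toNat mask rfl hpre mask_def 0 le_rfl []]
  have halt := alt_aux mask mask_def 0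
  have h0 : mask >>> (0:ℕ) = mask := by
    rw [shift_toNat_eq mask hpre 0, Nat.shiftRight_zero, Int.toNat_of_nonneg hpre]
  rw [h0] at halt
  simpa using halt.symm
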